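-- pv_equiv track=rewrite | github.com/Inala726/python-class | classwork.py | drug_anomaly
-- ===== SOURCE A (Python) =====
-- def drug_anomaly(data):
--     flagged = []
--     for i, medicine in enumerate(data):
--         for j in range(len(medicine) - 1):
--             if medicine[j] == 0 and medicine[j + 1] == 0:
--                 flagged.append(i)
--                 break
--     return flagged
-- ===== SOURCE B (Python) =====
-- from itertools import groupby
--
-- def drug_anomaly(data):
--     return [i for i, medicine in enumerate(data)
--             if any(k == 0 and sum(1 for _ in g) >= 2 for k, g in groupby(medicine))]
-- ===== Notes on version B (the rewrite author's own statement) =====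
-- stated objective: alternative
-- what changed: B replaces A's index-based adjacent-pair scan with an early break by itertools.groupby run-length analysis: a list is flagged iff it contains a maximal run of zeros of length >= 2, and the flagged indices are collected in a comprehension.
import Mathlib
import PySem

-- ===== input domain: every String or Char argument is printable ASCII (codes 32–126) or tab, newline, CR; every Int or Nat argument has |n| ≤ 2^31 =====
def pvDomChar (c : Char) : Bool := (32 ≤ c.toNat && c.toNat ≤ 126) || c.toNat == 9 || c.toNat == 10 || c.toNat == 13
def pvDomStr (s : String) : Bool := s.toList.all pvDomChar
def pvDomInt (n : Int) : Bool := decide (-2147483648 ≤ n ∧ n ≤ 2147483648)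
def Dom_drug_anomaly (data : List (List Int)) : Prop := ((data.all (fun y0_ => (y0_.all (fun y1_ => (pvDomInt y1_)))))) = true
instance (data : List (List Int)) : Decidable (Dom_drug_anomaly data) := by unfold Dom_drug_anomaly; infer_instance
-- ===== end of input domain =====

-- B flags a list via run-length analysis (groupby): a run of zeros of length ≥ 2,
-- instead of A's index scan over adjacent pairs with an early break. Same cost; 'alternative'.

-- ===== PORT A =====
-- inner loop over j in range(len(medicine)-1), with break on the first hit;
-- the default 0 in pyGetD is never used: every j drawn from the range is in bounds.
def drugInnerA (m : List Int) : List Int → Bool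
  | [] => false
  | j :: rest =>
    if PySem.List.pyGetD m j 0 == 0 && PySem.List.pyGetD m (j + 1) 0 == 0 then true
    else drugInnerA m rest

def drug_anomaly (data : List (List Int)) : List Int :=
  (PySem.List.enumerate data).foldl
    (fun flagged im =>
      if drugInnerA im.2 (PySem.List.pyRange 0 ((im.2.length : Int) - 1) 1) then
        flagged ++ [im.1]
      else flagged) []

-- ===== PORT B =====
-- maximal runs of equal consecutive values, as (key, run length) pairs — itertools.groupby
def runsOf : List Int → List (Int × Nat)
  | [] => []
  | x :: xs =>
    match runsOf xs with
    | [] => [(x, 1)]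
    | (k, c) :: rest => if x = k then (x, c + 1) :: rest else (x, 1) :: (k, c) :: rest

def drug_anomaly_alt (data : List (List Int)) : List Int :=
  (PySem.List.enumerate data).filterMap
    (fun im => if (runsOf im.2).any (fun kc => kc.1 == 0 && 2 ≤ kc.2) then some im.1 else none)

-- ===== PRECONDITION & SPEC =====
def Spec_drug_anomaly (data : List (List Int)) (out : List Int) : Prop := out = drug_anomaly_alt data
instance (data : List (List Int)) (out : List Int) : Decidable (Spec_drug_anomaly data out) := by unfold Spec_drug_anomaly; infer_instance

-- ===== CLAIM (what is proved, stated in full; the proofs are below) =====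
def Claim_equal_drug_anomaly : Prop := ∀ (data : List (List Int)), Dom_drug_anomaly data → Spec_drug_anomaly data (drug_anomaly data)

-- ===== LEMMAS AND PROOFS =====

-- common characterisation: "two consecutive zeros somewhere"
def hasZZ : List Int → Bool
  | x :: y :: ys => (x == 0 && y == 0) || hasZZ (y :: ys)
  | _ => false

-- A's inner loop is an 'any' over the index list
theorem drugInnerA_eq_any (m : List Int) (js : List Int) :
    drugInnerA m js =
      js.any (fun j => PySem.List.pyGetD m j 0 == 0 && PySem.List.pyGetD m (j + 1) 0 == 0) := by
  induction js with
  | nil => rfl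
  | cons j rest ih =>
    simp only [drugInnerA, List.any_cons, ih]
    split_ifs with h <;> simp_all

theorem pyGetD_succ_cons (a : Int) (t : List Int) (j : Int) (hj : 0 ≤ j) :
    PySem.List.pyGetD (a :: t) (j + 1) 0 = PySem.List.pyGetD t j 0 := by
  have h1 : (0 : Int) ≤ j + 1 := by omega
  have h2 : (j + 1).toNat = j.toNat + 1 := by omega
  simp [PySem.List.pyGetD, PySem.List.pyGet?, PySem.List.pyIdx?, hj, h1, h2]
  split_ifs with h <;> simp

theorem drugInnerA_eq_hasZZ (m : List Int) :
    drugInnerA m (PySem.List.pyRange 0 ((m.length : Int) - 1) 1) = hasZZ m := by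
  induction m with
  | nil => rfl
  | cons x xs ih =>
    cases xs with
    | nil => rfl
    | cons y ys =>
      rw [drugInnerA_eq_any] at *
      have hcons : PySem.List.pyRange 0 (((x :: y :: ys).length : Int) - 1) 1 =
          0 :: PySem.List.pyRange 1 (((x :: y :: ys).length : Int) - 1) 1 := by
        apply PySem.List.pyRange_one_cons; simp
      have hshift : PySem.List.pyRange 1 (((x :: y :: ys).length : Int) - 1) 1 =
          (PySem.List.pyRange 0 (((y :: ys).length : Int) - 1) 1).map (fun j => j + 1) := by
        simp [PySem.List.pyRange_one]; omega
      rw [hcons]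
      simp only [List.any_cons, hshift, List.any_map]
      have h0 : PySem.List.pyGetD (x :: y :: ys) 0 0 = x := by
        simp [PySem.List.pyGetD_zero_cons]
      have h1 : PySem.List.pyGetD (x :: y :: ys) (0 + 1) 0 = y := by
        have he : ((0 : Int) + 1) = ((1 : Nat) : Int) := by norm_num
        rw [he, PySem.List.pyGetD_natCast]; rfl
      have hrest :
          (PySem.List.pyRange 0 (((y :: ys).length : Int) - 1) 1).any
            ((fun j => PySem.List.pyGetD (x :: y :: ys) j 0 == 0 &&
                PySem.List.pyGetD (x :: y :: ys) (j + 1) 0 == 0) ∘ (fun j => j + 1)) =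
          (PySem.List.pyRange 0 (((y :: ys).length : Int) - 1) 1).any
            (fun j => PySem.List.pyGetD (y :: ys) j 0 == 0 &&
                PySem.List.pyGetD (y :: ys) (j + 1) 0 == 0) := by
        apply PySem.List.any_congr_mem
        intro j hj
        have hj' := (PySem.List.mem_pyRange_one).1 hj
        have e1 := pyGetD_succ_cons x (y :: ys) j (by omega)
        have e2 := pyGetD_succ_cons x (y :: ys) (j + 1) (by omega)
        simp only [Function.comp, e1, e2]
      rw [hrest, ih, h0, h1]
      show ((x == 0 && y == 0) || hasZZ (y :: ys)) = hasZZ (x :: y :: ys)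
      rfl

-- definitional cons-equation for runsOf
theorem runsOf_cons (x : Int) (xs : List Int) :
    runsOf (x :: xs) = match runsOf xs with
      | [] => [(x, 1)]
      | (k, c) :: rest => if x = k then (x, c + 1) :: rest else (x, 1) :: (k, c) :: rest := rfl

-- B side: head of runsOf (x :: xs) starts the run of x, with positive length
theorem runsOf_cons_head (x : Int) (xs : List Int) :
    ∃ c rest, runsOf (x :: xs) = (x, c) :: rest ∧ 1 ≤ c := by
  cases h : runsOf xs with
  | nil => exact ⟨1, [], by simp [runsOf, h], le_refl 1⟩
  | cons p rest =>
    obtain ⟨k, c⟩ := p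
    by_cases hxk : x = k
    · exact ⟨c + 1, rest, by rw [runsOf_cons, h]; simp [hxk], by omega⟩
    · exact ⟨1, (k, c) :: rest, by rw [runsOf_cons, h]; simp [hxk], le_refl 1⟩

theorem runsOf_any_eq_hasZZ (m : List Int) :
    (runsOf m).any (fun kc => kc.1 == 0 && 2 ≤ kc.2) = hasZZ m := by
  induction m with
  | nil => rfl
  | cons x xs ih =>
    cases xs with
    | nil => simp [runsOf, hasZZ]
    | cons y ys =>
      obtain ⟨c, rest, heq, hc⟩ := runsOf_cons_head y ys
      have hB : (runsOf (y :: ys)).any (fun kc => kc.1 == 0 && 2 ≤ kc.2) =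
          ((y == 0 && decide (2 ≤ c)) || rest.any (fun kc => kc.1 == 0 && 2 ≤ kc.2)) := by
        rw [heq]; simp
      by_cases hxy : x = y
      · have hr : runsOf (x :: y :: ys) = (x, c + 1) :: rest := by
          rw [runsOf_cons, heq]; simp [hxy]
        rw [hr]
        have hz : hasZZ (x :: y :: ys) = ((x == 0 && y == 0) || hasZZ (y :: ys)) := rfl
        rw [hz, ← ih, hB]
        subst hxy
        by_cases hx0 : x = 0
        · simp [hx0]; omega
        · have hx : (x == 0) = false := by simp [hx0]
          simp [hx]
      · have hr : runsOf (x :: y :: ys) = (x, 1) :: (y, c) :: rest := by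
          rw [runsOf_cons, heq]; simp [hxy]
        rw [hr]
        have hz : hasZZ (x :: y :: ys) = ((x == 0 && y == 0) || hasZZ (y :: ys)) := rfl
        rw [hz, ← ih, heq]
        by_cases hx0 : x = 0
        · have hy0 : ¬ y = 0 := by intro h; exact hxy (by rw [hx0, h])
          simp [hx0, hy0]
        · simp [hx0]

-- outer loops: A's append-fold equals B's filterMap, given equal per-row tests
theorem fold_eq_filterMap (l : List (Int × List Int)) (acc : List Int) :
    l.foldl (fun flagged im =>
      if drugInnerA im.2 (PySem.List.pyRange 0 ((im.2.length : Int) - 1) 1) then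
        flagged ++ [im.1]
      else flagged) acc =
    acc ++ l.filterMap
      (fun im => if (runsOf im.2).any (fun kc => kc.1 == 0 && 2 ≤ kc.2) then some im.1 else none) := by
  induction l generalizing acc with
  | nil => simp
  | cons p t ih =>
    simp only [List.foldl_cons, List.filterMap_cons]
    rw [drugInnerA_eq_hasZZ, ← runsOf_any_eq_hasZZ]
    split_ifs with h <;> simp [ih]

-- ===== VERDICT (by name: the statement is the Claim_ definition above) =====
theorem drug_anomaly_spec : Claim_equal_drug_anomaly := by
  intro data _
  show drug_anomaly data = drug_anomaly_alt data
  unfold drug_anomaly drug_anomaly_alt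
  rw [fold_eq_filterMap]
  simp
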